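-- pv_equiv track=rewrite | github.com/yungchentang/pdf2md | pdf2md.py | parse_launchctl_print
-- ===== SOURCE A (Python) =====
-- def parse_launchctl_print(text: str) -> dict[str, str]:
--     fields: dict[str, str] = {}
--     for line in text.splitlines():
--         stripped = line.strip()
--         if stripped.startswith("state = "):
--             fields["state"] = stripped.removeprefix("state = ")
--         if stripped.startswith("pid = "):
--             fields["pid"] = stripped.removeprefix("pid = ")
--         if stripped.startswith("last exit code = "):
--             fields["last_exit"] = stripped.removeprefix("last exit code = ")
--     return fields
-- ===== SOURCE B (Python) =====
-- FIELDS = [("state", "state = "), ("pid", "pid = "), ("last_exit", "last exit code = ")]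
--
--
-- def parse_launchctl_print(text: str) -> dict[str, str]:
--     lines = [line.strip() for line in text.splitlines()]
--     fields: dict[str, str] = {}
--     for key, prefix in FIELDS:
--         matches = [line[len(prefix):] for line in lines if line.startswith(prefix)]
--         if matches:
--             fields[key] = matches[-1]
--     return fields
-- ===== Notes on version B (the rewrite author's own statement) =====
-- stated objective: alternative
-- what changed: B replaces A's single pass with three inline prefix checks by a field-indexed decomposition: for each of the three fields it scans the stripped lines once, collects the matching remainders, and keeps the last one; Pre_ excludes texts whose fields first appear out of the canonical state/pid/last-exit order, where A's dict insertion order (first occurrence) and B's fixed field order are both defensible orderings of the same key/value pairs.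
import Mathlib
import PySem

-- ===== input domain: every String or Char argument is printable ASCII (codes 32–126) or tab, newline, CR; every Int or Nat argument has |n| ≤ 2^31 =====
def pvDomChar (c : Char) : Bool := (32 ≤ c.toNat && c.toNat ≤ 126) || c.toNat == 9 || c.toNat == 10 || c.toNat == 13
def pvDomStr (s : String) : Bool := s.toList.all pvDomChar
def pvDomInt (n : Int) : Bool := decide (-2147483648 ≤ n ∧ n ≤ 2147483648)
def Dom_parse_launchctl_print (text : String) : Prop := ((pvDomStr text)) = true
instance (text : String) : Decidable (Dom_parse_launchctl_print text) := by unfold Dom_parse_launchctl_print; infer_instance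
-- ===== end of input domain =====

-- B extracts each field by its own scan over the stripped lines (last match wins) instead of A's
-- single dict-mutating pass; alternative decomposition, not faster. Pre_ excludes texts whose
-- fields first appear out of the canonical order, where the two dict key orders differ.


-- ===== PORT A =====
-- exact port of Python's str.removeprefix (PySem has no primitive): drop the prefix iff present
def pyRemoveprefix (s p : List Char) : List Char :=
  if PySem.Chars.startswith s p then s.drop p.length else s

def parse_launchctl_print (text : String) : List (String × String) :=
  ((PySem.Str.splitlines text).foldl
    (fun (fields : PySem.Dict String String) line =>
      let stripped : List Char := (PySem.Str.strip line).toList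
      let fields := if PySem.Chars.startswith stripped "state = ".toList then
          fields.insert "state" (String.ofList (pyRemoveprefix stripped "state = ".toList)) else fields
      let fields := if PySem.Chars.startswith stripped "pid = ".toList then
          fields.insert "pid" (String.ofList (pyRemoveprefix stripped "pid = ".toList)) else fields
      if PySem.Chars.startswith stripped "last exit code = ".toList then
          fields.insert "last_exit" (String.ofList (pyRemoveprefix stripped "last exit code = ".toList)) else fields)
    PySem.Dict.empty).items

-- ===== PORT B =====
-- the FIELDS table of Source B
def pvFields : List (String × List Char) :=
  [("state", "state = ".toList), ("pid", "pid = ".toList), ("last_exit", "last exit code = ".toList)]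

-- [line.strip() for line in text.splitlines()]
def pvStrippedLines (text : String) : List (List Char) :=
  (PySem.Str.splitlines text).map (fun l => (PySem.Str.strip l).toList)

def parse_launchctl_print_alt (text : String) : List (String × String) :=
  let lines := pvStrippedLines text
  (pvFields.foldl
    (fun (fields : PySem.Dict String String) kp =>
      let ms := (lines.filter (fun s => PySem.Chars.startswith s kp.2)).map (fun s => s.drop kp.2.length)
      match ms.getLast? with      -- "if matches: … matches[-1]"
      | some v => fields.insert kp.1 (String.ofList v)
      | none => fields)
    PySem.Dict.empty).items

-- ===== PRECONDITION & SPEC =====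
-- first-occurrence order of two prefixes among the stripped lines (true if either is absent)
def pvBefore (L : List (List Char)) (p q : List Char) : Bool :=
  if L.any (fun s => PySem.Chars.startswith s p) && L.any (fun s => PySem.Chars.startswith s q) then
    decide (L.findIdx (fun s => PySem.Chars.startswith s p) < L.findIdx (fun s => PySem.Chars.startswith s q))
  else true

-- Pre_ excludes texts whose fields first occur out of the canonical state, pid, last-exit order:
-- there A's dict holds the keys in first-occurrence order while B holds them in field order, and
-- either insertion order of the same key/value pairs is defensible.
def Pre_parse_launchctl_print (text : String) : Prop :=
  (pvBefore (pvStrippedLines text) "state = ".toList "pid = ".toList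
    && pvBefore (pvStrippedLines text) "state = ".toList "last exit code = ".toList
    && pvBefore (pvStrippedLines text) "pid = ".toList "last exit code = ".toList) = true

instance (text : String) : Decidable (Pre_parse_launchctl_print text) := by
  unfold Pre_parse_launchctl_print; infer_instance

def pvWitness_parse_launchctl_print : String := "state = running\npid = 7\nlast exit code = 0"

def Spec_parse_launchctl_print (text : String) (out : List (String × String)) : Prop :=
  out = parse_launchctl_print_alt text
instance (text : String) (out : List (String × String)) : Decidable (Spec_parse_launchctl_print text out) := by
  unfold Spec_parse_launchctl_print; infer_instance

-- ===== CLAIM (what is proved, stated in full; the proofs are below) =====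
def Claim_equal_parse_launchctl_print : Prop :=
  ∀ (text : String), Dom_parse_launchctl_print text → Pre_parse_launchctl_print text →
    Spec_parse_launchctl_print text (parse_launchctl_print text)

-- ===== LEMMAS AND PROOFS =====

-- string-literal `.toList` in char-list form, for aligning with simp's normal form
lemma pv_tl_state : "state = ".toList = ['s','t','a','t','e',' ','=',' '] := rfl
lemma pv_tl_pid : "pid = ".toList = ['p','i','d',' ','=',' '] := rfl
lemma pv_tl_last :
    "last exit code = ".toList = ['l','a','s','t',' ','e','x','i','t',' ','c','o','d','e',' ','=',' '] := rfl

-- A's loop body on an already-stripped line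
def pvStepA (fields : PySem.Dict String String) (stripped : List Char) : PySem.Dict String String :=
  let fields := if PySem.Chars.startswith stripped "state = ".toList then
      fields.insert "state" (String.ofList (pyRemoveprefix stripped "state = ".toList)) else fields
  let fields := if PySem.Chars.startswith stripped "pid = ".toList then
      fields.insert "pid" (String.ofList (pyRemoveprefix stripped "pid = ".toList)) else fields
  if PySem.Chars.startswith stripped "last exit code = ".toList then
      fields.insert "last_exit" (String.ofList (pyRemoveprefix stripped "last exit code = ".toList)) else fields

-- first (key, prefix) of pvFields whose prefix the line starts with
def pvKeyOf (s : List Char) : Option String :=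
  (pvFields.find? (fun kp => PySem.Chars.startswith s kp.2)).map (·.1)

def pvKeys (L : List (List Char)) : List String := (L.map pvKeyOf).filterMap id

def pvPrefixOf (k : String) : List Char := (PySem.Dict.ofList pvFields).getD k []

-- last matching line's remainder (A's dict value for k)
def pvLastValue (lines : List (List Char)) (key : String) : String :=
  match lines.reverse.find? (fun s => PySem.Chars.startswith s (pvPrefixOf key)) with
  | some s => String.ofList (s.drop (pvPrefixOf key).length)
  | none => ""

-- A's dict as a list: first-seen keys in order, each with its last value
def pvBuildB (L : List (List Char)) : List (String × String) :=
  (PySem.List.dedup (pvKeys L)).map (fun k => (k, pvLastValue L k))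

-- two distinct fixed prefixes cannot both be prefixes of the same line
lemma pv_excl (s p q : List Char) (hlen : q.length ≤ p.length) (hne : q ≠ p.take q.length)
    (hp : PySem.Chars.startswith s p = true) : PySem.Chars.startswith s q = false := by
  rw [PySem.Chars.startswith_iff] at hp
  by_contra h
  rw [Bool.not_eq_false, PySem.Chars.startswith_iff] at h
  apply hne
  rw [List.prefix_iff_eq_take] at hp h
  calc q = List.take q.length s := h
    _ = List.take q.length (List.take p.length s) := by rw [List.take_take, Nat.min_eq_left hlen]
    _ = List.take q.length p := by rw [← hp]

lemma pv_excl2 (s p q : List Char) (hlen : p.length ≤ q.length) (hne : p ≠ q.take p.length)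
    (hp : PySem.Chars.startswith s p = true) : PySem.Chars.startswith s q = false := by
  by_contra hc
  rw [Bool.not_eq_false] at hc
  have := pv_excl s q p hlen hne hc
  rw [hp] at this
  cases this

-- the six pairwise exclusions between the three prefixes
lemma pv_sw_sp (s : List Char) (h : PySem.Chars.startswith s "state = ".toList = true) :
    PySem.Chars.startswith s "pid = ".toList = false :=
  pv_excl s "state = ".toList "pid = ".toList (by decide) (by decide) h
lemma pv_sw_sl (s : List Char) (h : PySem.Chars.startswith s "state = ".toList = true) :
    PySem.Chars.startswith s "last exit code = ".toList = false :=
  pv_excl2 s "state = ".toList "last exit code = ".toList (by decide) (by decide) h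
lemma pv_sw_ps (s : List Char) (h : PySem.Chars.startswith s "pid = ".toList = true) :
    PySem.Chars.startswith s "state = ".toList = false :=
  pv_excl2 s "pid = ".toList "state = ".toList (by decide) (by decide) h
lemma pv_sw_pl (s : List Char) (h : PySem.Chars.startswith s "pid = ".toList = true) :
    PySem.Chars.startswith s "last exit code = ".toList = false :=
  pv_excl2 s "pid = ".toList "last exit code = ".toList (by decide) (by decide) h
lemma pv_sw_ls (s : List Char) (h : PySem.Chars.startswith s "last exit code = ".toList = true) :
    PySem.Chars.startswith s "state = ".toList = false :=
  pv_excl s "last exit code = ".toList "state = ".toList (by decide) (by decide) h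
lemma pv_sw_lp (s : List Char) (h : PySem.Chars.startswith s "last exit code = ".toList = true) :
    PySem.Chars.startswith s "pid = ".toList = false :=
  pv_excl s "last exit code = ".toList "pid = ".toList (by decide) (by decide) h

lemma pv_not_of_false {b : Bool} (h : b = false) : ¬ (b = true) := by simp [h]

lemma pv_keyOf_eq_state (s : List Char) (h : PySem.Chars.startswith s "state = ".toList = true) :
    pvKeyOf s = some "state" := by
  unfold pvKeyOf pvFields
  rw [List.find?_cons_of_pos (p := fun kp => PySem.Chars.startswith s kp.2) (a := ("state", "state = ".toList)) (l := [("pid", "pid = ".toList), ("last_exit", "last exit code = ".toList)]) h]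
  rfl

lemma pv_keyOf_eq_pid (s : List Char) (h : PySem.Chars.startswith s "pid = ".toList = true) :
    pvKeyOf s = some "pid" := by
  unfold pvKeyOf pvFields
  rw [List.find?_cons_of_neg (p := fun kp => PySem.Chars.startswith s kp.2) (a := ("state", "state = ".toList)) (l := [("pid", "pid = ".toList), ("last_exit", "last exit code = ".toList)])
      (pv_not_of_false (pv_sw_ps s h)),
    List.find?_cons_of_pos (p := fun kp => PySem.Chars.startswith s kp.2) (a := ("pid", "pid = ".toList)) (l := [("last_exit", "last exit code = ".toList)]) h]
  rfl

lemma pv_keyOf_eq_last (s : List Char)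
    (h : PySem.Chars.startswith s "last exit code = ".toList = true) :
    pvKeyOf s = some "last_exit" := by
  unfold pvKeyOf pvFields
  rw [List.find?_cons_of_neg (p := fun kp => PySem.Chars.startswith s kp.2) (a := ("state", "state = ".toList)) (l := [("pid", "pid = ".toList), ("last_exit", "last exit code = ".toList)])
      (pv_not_of_false (pv_sw_ls s h)),
    List.find?_cons_of_neg (p := fun kp => PySem.Chars.startswith s kp.2) (a := ("pid", "pid = ".toList)) (l := [("last_exit", "last exit code = ".toList)])
      (pv_not_of_false (pv_sw_lp s h)),
    List.find?_cons_of_pos (p := fun kp => PySem.Chars.startswith s kp.2) (a := ("last_exit", "last exit code = ".toList)) (l := []) h]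
  rfl

lemma pv_keyOf_eq_none (s : List Char)
    (h1 : PySem.Chars.startswith s "state = ".toList = false)
    (h2 : PySem.Chars.startswith s "pid = ".toList = false)
    (h3 : PySem.Chars.startswith s "last exit code = ".toList = false) :
    pvKeyOf s = none := by
  unfold pvKeyOf pvFields
  rw [List.find?_cons_of_neg (p := fun kp => PySem.Chars.startswith s kp.2) (a := ("state", "state = ".toList)) (l := [("pid", "pid = ".toList), ("last_exit", "last exit code = ".toList)]) (pv_not_of_false h1),
    List.find?_cons_of_neg (p := fun kp => PySem.Chars.startswith s kp.2) (a := ("pid", "pid = ".toList)) (l := [("last_exit", "last exit code = ".toList)]) (pv_not_of_false h2),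
    List.find?_cons_of_neg (p := fun kp => PySem.Chars.startswith s kp.2) (a := ("last_exit", "last exit code = ".toList)) (l := []) (pv_not_of_false h3)]
  rfl

lemma pvPrefixOf_state : pvPrefixOf "state" = "state = ".toList := by decide
lemma pvPrefixOf_pid : pvPrefixOf "pid" = "pid = ".toList := by decide
lemma pvPrefixOf_last : pvPrefixOf "last_exit" = "last exit code = ".toList := by decide

lemma pvPrefixOf_mem {k : String} {p : List Char} (h : (k, p) ∈ pvFields) : pvPrefixOf k = p := by
  fin_cases h <;> decide

lemma pv_keyOf_some {s : List Char} {k : String} (h : pvKeyOf s = some k) :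
    (k, pvPrefixOf k) ∈ pvFields ∧ PySem.Chars.startswith s (pvPrefixOf k) = true := by
  unfold pvKeyOf at h
  cases hf : pvFields.find? (fun kp => PySem.Chars.startswith s kp.2) with
  | none => rw [hf] at h; cases h
  | some kp =>
    rw [hf] at h
    have hk : kp.1 = k := by cases h; rfl
    have hmem := List.mem_of_find?_eq_some hf
    have hpred := List.find?_some hf
    have hkp : (kp.1, kp.2) ∈ pvFields := by simpa using hmem
    have hpre : pvPrefixOf kp.1 = kp.2 := pvPrefixOf_mem hkp
    subst hk
    exact ⟨by rw [hpre]; simpa using hmem, by rw [hpre]; exact hpred⟩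

lemma pv_keyOf_none {s : List Char} (h : pvKeyOf s = none) :
    ∀ kp ∈ pvFields, PySem.Chars.startswith s kp.2 = false := by
  unfold pvKeyOf at h
  cases hf : pvFields.find? (fun kp => PySem.Chars.startswith s kp.2) with
  | some kp => rw [hf] at h; cases h
  | none =>
    intro kp hkp
    have := List.find?_eq_none.1 hf kp hkp
    simpa using this

lemma pv_only {s : List Char} {k : String} (h : pvKeyOf s = some k) :
    ∀ kp ∈ pvFields, kp.1 ≠ k → PySem.Chars.startswith s kp.2 = false := by
  intro kp hkp hne
  fin_cases hkp
  · cases hs : PySem.Chars.startswith s "state = ".toList with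
    | false => rfl
    | true => exact absurd (Option.some.inj ((pv_keyOf_eq_state s hs).symm.trans h)) hne
  · cases hs : PySem.Chars.startswith s "pid = ".toList with
    | false => rfl
    | true => exact absurd (Option.some.inj ((pv_keyOf_eq_pid s hs).symm.trans h)) hne
  · cases hs : PySem.Chars.startswith s "last exit code = ".toList with
    | false => rfl
    | true => exact absurd (Option.some.inj ((pv_keyOf_eq_last s hs).symm.trans h)) hne

lemma pvLastValue_append (L : List (List Char)) (s : List Char) (k : String) :
    pvLastValue (L ++ [s]) k =
      if PySem.Chars.startswith s (pvPrefixOf k) then String.ofList (s.drop (pvPrefixOf k).length)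
      else pvLastValue L k := by
  unfold pvLastValue pvPrefixOf
  rw [List.reverse_append]
  simp only [List.reverse_singleton, List.singleton_append, List.find?_cons]
  cases h : PySem.Chars.startswith s ((PySem.Dict.ofList pvFields).getD k []) <;> simp [h]

lemma pvKeys_append (L : List (List Char)) (s : List Char) :
    pvKeys (L ++ [s]) = pvKeys L ++ (pvKeyOf s).toList := by
  unfold pvKeys
  rw [List.map_append, List.filterMap_append]
  cases h : pvKeyOf s <;> simp [h]

lemma pv_mem_keys {L : List (List Char)} {k : String} (hk : k ∈ pvKeys L) :
    (k, pvPrefixOf k) ∈ pvFields := by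
  unfold pvKeys at hk
  rw [List.mem_filterMap] at hk
  obtain ⟨o, ho, hid⟩ := hk
  rw [List.mem_map] at ho
  obtain ⟨s', _, hs'⟩ := ho
  cases o with
  | none => cases hid
  | some k' =>
    have : pvKeyOf s' = some k := by rw [hs']; exact hid
    exact (pv_keyOf_some this).1

lemma pv_stepA_eq (d : PySem.Dict String String) (s : List Char) :
    pvStepA d s = match pvKeyOf s with
      | none => d
      | some k => d.insert k (String.ofList (s.drop (pvPrefixOf k).length)) := by
  by_cases h1 : PySem.Chars.startswith s "state = ".toList = true
  · have h2 := pv_sw_sp s h1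
    have h3 := pv_sw_sl s h1
    rw [pv_keyOf_eq_state s h1]
    rw [pv_tl_state] at h1
    rw [pv_tl_pid] at h2
    rw [pv_tl_last] at h3
    simp [pvStepA, pyRemoveprefix, pvPrefixOf_state, pv_tl_state, pv_tl_pid, pv_tl_last, h1, h2, h3]
  · rw [Bool.not_eq_true] at h1
    by_cases h2 : PySem.Chars.startswith s "pid = ".toList = true
    · have h3 := pv_sw_pl s h2
      rw [pv_keyOf_eq_pid s h2]
      rw [pv_tl_state] at h1
      rw [pv_tl_pid] at h2
      rw [pv_tl_last] at h3
      simp [pvStepA, pyRemoveprefix, pvPrefixOf_pid, pv_tl_state, pv_tl_pid, pv_tl_last, h1, h2, h3]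
    · rw [Bool.not_eq_true] at h2
      by_cases h3 : PySem.Chars.startswith s "last exit code = ".toList = true
      · rw [pv_keyOf_eq_last s h3]
        rw [pv_tl_state] at h1
        rw [pv_tl_pid] at h2
        rw [pv_tl_last] at h3
        simp [pvStepA, pyRemoveprefix, pvPrefixOf_last, pv_tl_state, pv_tl_pid, pv_tl_last, h1, h2, h3]
      · rw [Bool.not_eq_true] at h3
        rw [pv_keyOf_eq_none s h1 h2 h3]
        rw [pv_tl_state] at h1
        rw [pv_tl_pid] at h2
        rw [pv_tl_last] at h3
        simp [pvStepA, pv_tl_state, pv_tl_pid, pv_tl_last, h1, h2, h3]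

lemma pv_main (L : List (List Char)) :
    (L.foldl pvStepA PySem.Dict.empty).items = pvBuildB L := by
  induction L using List.reverseRecOn with
  | nil => rfl
  | append_singleton L s ih =>
    have hd : L.foldl pvStepA PySem.Dict.empty = PySem.Dict.mk (pvBuildB L) :=
      PySem.Dict.ext ih
    rw [List.foldl_append, hd, List.foldl_cons, List.foldl_nil, pv_stepA_eq]
    cases hko : pvKeyOf s with
    | none =>
      have hall := pv_keyOf_none hko
      show pvBuildB L = pvBuildB (L ++ [s])
      unfold pvBuildB
      rw [pvKeys_append, hko, Option.toList_none, List.append_nil]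
      apply List.map_congr_left
      intro k hkd
      have hk : k ∈ pvKeys L := (PySem.List.mem_dedup _ _).1 hkd
      have hf := hall _ (pv_mem_keys hk)
      rw [pvLastValue_append, hf]
      simp
    | some k =>
      obtain ⟨hkf, hstart⟩ := pv_keyOf_some hko
      have honly := pv_only hko
      show (PySem.Dict.insert ⟨pvBuildB L⟩ k
        (String.ofList (s.drop (pvPrefixOf k).length))).items = pvBuildB (L ++ [s])
      by_cases hmem : k ∈ pvKeys L
      · have hcont : (PySem.Dict.mk (pvBuildB L)).contains k = true := by
          unfold PySem.Dict.contains
          rw [List.any_eq_true]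
          refine ⟨(k, pvLastValue L k), ?_, by simp⟩
          exact List.mem_map_of_mem ((PySem.List.mem_dedup _ _).2 hmem)
        unfold PySem.Dict.insert
        rw [hcont]
        simp only [if_true]
        show ((pvBuildB L).map fun p => if p.1 == k then (k, _) else p) = pvBuildB (L ++ [s])
        unfold pvBuildB
        rw [pvKeys_append, hko, Option.toList_some]
        simp only [PySem.List.dedup_eq_ofList]
        rw [PySem.Set.ofList_append_singleton,
          PySem.Set.add_of_mem ((PySem.Set.mem_ofList _ _).2 hmem), List.map_map]
        apply List.map_congr_left
        intro k' hk'
        have hk'mem : k' ∈ pvKeys L := (PySem.Set.mem_ofList _ _).1 hk'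
        by_cases hkk : k' = k
        · subst hkk
          simp [Function.comp, pvLastValue_append, hstart]
        · have hf := honly (k', pvPrefixOf k') (pv_mem_keys hk'mem) hkk
          simp [Function.comp, hkk, pvLastValue_append, hf]
      · have hcont : (PySem.Dict.mk (pvBuildB L)).contains k = false := by
          unfold PySem.Dict.contains
          rw [List.any_eq_false]
          rintro ⟨k', v'⟩ hp
          unfold pvBuildB at hp
          rw [List.mem_map] at hp
          obtain ⟨k'', hk'', he⟩ := hp
          cases he
          simp only [beq_iff_eq]
          intro h
          exact hmem (h ▸ (PySem.List.mem_dedup _ _).1 hk'')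
        unfold PySem.Dict.insert
        rw [hcont]
        simp only [Bool.false_eq_true, if_false]
        show pvBuildB L ++ [(k, _)] = pvBuildB (L ++ [s])
        unfold pvBuildB
        rw [pvKeys_append, hko, Option.toList_some]
        simp only [PySem.List.dedup_eq_ofList]
        rw [PySem.Set.ofList_append_singleton,
          PySem.Set.add_of_not_mem (fun hc => hmem ((PySem.Set.mem_ofList _ _).1 hc)),
          List.map_append]
        congr 1
        · apply List.map_congr_left
          intro k' hk'
          have hk'mem : k' ∈ pvKeys L := (PySem.Set.mem_ofList _ _).1 hk'
          have hkk : k' ≠ k := fun h => hmem (h ▸ hk'mem)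
          have hf := honly (k', pvPrefixOf k') (pv_mem_keys hk'mem) hkk
          rw [pvLastValue_append, hf]
          simp
        · rw [List.map_singleton, pvLastValue_append, hstart]
          simp

-- ========== B-side characterisation ==========

def pvPresent (L : List (List Char)) (p : List Char) : Bool :=
  L.any (fun s => PySem.Chars.startswith s p)

def pvValB (L : List (List Char)) (p : List Char) : String :=
  String.ofList ((((L.filter (fun s => PySem.Chars.startswith s p)).map
    (fun s => s.drop p.length)).getLast?).getD [])

def pvCanon (L : List (List Char)) : List (String × String) :=
  (pvFields.filter (fun kp => pvPresent L kp.2)).map (fun kp => (kp.1, pvValB L kp.2))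

lemma pv_find?_reverse {α : Type} (P : α → Bool) (L : List α) :
    L.reverse.find? P = (L.filter P).getLast? := by
  induction L using List.reverseRecOn with
  | nil => rfl
  | append_singleton L s ih =>
    cases h : P s with
    | true =>
      rw [List.reverse_append, List.reverse_singleton, List.singleton_append,
        List.find?_cons_of_pos h, List.filter_append]
      simp [h]
    | false =>
      rw [List.reverse_append, List.reverse_singleton, List.singleton_append,
        List.find?_cons_of_neg (by simp [h]), List.filter_append, ih]
      simp [h]

lemma pv_stepB (L : List (List Char)) (d : PySem.Dict String String) (kp : String × List Char) :
    (match ((L.filter (fun s => PySem.Chars.startswith s kp.2)).map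
        (fun s => s.drop kp.2.length)).getLast? with
      | some v => d.insert kp.1 (String.ofList v)
      | none => d) =
    (if pvPresent L kp.2 then d.insert kp.1 (pvValB L kp.2) else d) := by
  cases hg : ((L.filter (fun s => PySem.Chars.startswith s kp.2)).map
      (fun s => s.drop kp.2.length)).getLast? with
  | none =>
    have hg' := hg
    rw [List.getLast?_eq_none_iff, List.map_eq_nil_iff, List.filter_eq_nil_iff] at hg'
    have hpres : pvPresent L kp.2 = false := by
      unfold pvPresent
      rw [List.any_eq_false]
      exact fun s hs => by simpa using hg' s hs
    simp [hpres]
  | some v =>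
    have hne : (L.filter (fun s => PySem.Chars.startswith s kp.2)) ≠ [] := by
      intro h
      rw [List.map_eq_nil_iff.2 h] at hg
      cases hg
    have hpres : pvPresent L kp.2 = true := by
      unfold pvPresent
      rw [List.any_eq_true]
      obtain ⟨s, hs⟩ := List.exists_mem_of_ne_nil _ hne
      exact ⟨s, (List.mem_filter.1 hs).1, (List.mem_filter.1 hs).2⟩
    have hv : pvValB L kp.2 = String.ofList v := by
      unfold pvValB
      rw [hg]
      rfl
    simp [hpres, hv]

lemma pv_alt_eq_canon (text : String) :
    parse_launchctl_print_alt text = pvCanon (pvStrippedLines text) := by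
  have h := List.foldl_ext
    (fun (fields : PySem.Dict String String) (kp : String × List Char) =>
      let ms := ((pvStrippedLines text).filter (fun s => PySem.Chars.startswith s kp.2)).map
        (fun s => s.drop kp.2.length)
      match ms.getLast? with
      | some v => fields.insert kp.1 (String.ofList v)
      | none => fields)
    (fun (fields : PySem.Dict String String) (kp : String × List Char) =>
      if pvPresent (pvStrippedLines text) kp.2 then
        fields.insert kp.1 (pvValB (pvStrippedLines text) kp.2) else fields)
    PySem.Dict.empty (l := pvFields)
    (fun d kp _ => pv_stepB (pvStrippedLines text) d kp)
  have halt : parse_launchctl_print_alt text =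
      (pvFields.foldl
        (fun (fields : PySem.Dict String String) (kp : String × List Char) =>
          if pvPresent (pvStrippedLines text) kp.2 then
            fields.insert kp.1 (pvValB (pvStrippedLines text) kp.2) else fields)
        PySem.Dict.empty).items := congrArg PySem.Dict.items h
  rw [halt]
  unfold pvCanon pvFields
  cases h1 : pvPresent (pvStrippedLines text) "state = ".toList <;>
    cases h2 : pvPresent (pvStrippedLines text) "pid = ".toList <;>
      cases h3 : pvPresent (pvStrippedLines text) "last exit code = ".toList <;>
        rw [pv_tl_state] at h1 <;> rw [pv_tl_pid] at h2 <;> rw [pv_tl_last] at h3 <;>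
          simp [pv_tl_state, pv_tl_pid, pv_tl_last, h1, h2, h3, PySem.Dict.insert,
            PySem.Dict.contains, PySem.Dict.empty]

-- ========== key order: dedup (pvKeys L) = canonical present keys, under Pre_ ==========

def pvRank (k : String) : Nat :=
  if k = "state" then 0 else if k = "pid" then 1 else if k = "last_exit" then 2 else 3

-- dedup lists elements in first-occurrence order
lemma pv_dedup_pairwise {α : Type} [BEq α] [LawfulBEq α] (xs : List α) :
    (PySem.List.dedup xs).Pairwise (fun a b => xs.idxOf a < xs.idxOf b) := by
  induction xs using List.reverseRecOn with
  | nil => simp [PySem.List.dedup]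
  | append_singleton xs x ih =>
    have hshape : PySem.List.dedup (xs ++ [x]) =
        if x ∈ xs then PySem.List.dedup xs else PySem.List.dedup xs ++ [x] := by
      rw [PySem.List.dedup_eq_ofList, PySem.Set.ofList_append_singleton]
      by_cases hx : x ∈ xs
      · rw [PySem.Set.add_of_mem ((PySem.Set.mem_ofList _ _).2 hx), if_pos hx,
          ← PySem.List.dedup_eq_ofList]
      · rw [PySem.Set.add_of_not_mem (fun hc => hx ((PySem.Set.mem_ofList _ _).1 hc)), if_neg hx,
          ← PySem.List.dedup_eq_ofList]
    rw [hshape]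
    by_cases hx : x ∈ xs
    · rw [if_pos hx]
      refine ih.imp_of_mem ?_
      intro a b ha hb hab
      have ham : a ∈ xs := (PySem.List.mem_dedup _ _).1 ha
      have hbm : b ∈ xs := (PySem.List.mem_dedup _ _).1 hb
      rwa [List.idxOf_append_of_mem ham, List.idxOf_append_of_mem hbm]
    · rw [if_neg hx]
      rw [List.pairwise_append]
      refine ⟨ih.imp_of_mem ?_, by simp, ?_⟩
      · intro a b ha hb hab
        have ham : a ∈ xs := (PySem.List.mem_dedup _ _).1 ha
        have hbm : b ∈ xs := (PySem.List.mem_dedup _ _).1 hb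
        rwa [List.idxOf_append_of_mem ham, List.idxOf_append_of_mem hbm]
      · intro a ha b hb
        rw [List.mem_singleton] at hb
        subst hb
        have ham : a ∈ xs := (PySem.List.mem_dedup _ _).1 ha
        rw [List.idxOf_append_of_mem ham, List.idxOf_append_of_notMem hx]
        exact Nat.lt_of_lt_of_le (List.idxOf_lt_length_of_mem ham) (Nat.le_add_right _ _)

-- filterMap preserves the relative order of first occurrences
lemma pv_fm_order (L : List (List Char)) (a b : String) (hab : a ≠ b)
    (hbm : b ∈ pvKeys L)
    (hlt : (pvKeys L).idxOf a < (pvKeys L).idxOf b) :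
    L.findIdx (fun s => pvKeyOf s == some a) < L.findIdx (fun s => pvKeyOf s == some b) := by
  induction L with
  | nil => cases hbm
  | cons s rest ih =>
    have hKeys : pvKeys (s :: rest) = match pvKeyOf s with
        | none => pvKeys rest
        | some c => c :: pvKeys rest := by
      unfold pvKeys
      cases h : pvKeyOf s <;> simp [h]
    cases hko : pvKeyOf s with
    | none =>
      rw [hko] at hKeys
      rw [hKeys] at hbm hlt
      have hpa : (pvKeyOf s == some a) = false := by simp [hko]
      have hpb : (pvKeyOf s == some b) = false := by simp [hko]
      rw [List.findIdx_cons, hpa, List.findIdx_cons, hpb]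
      simpa using ih hbm hlt
    | some c =>
      rw [hko] at hKeys
      rw [hKeys] at hbm hlt
      by_cases hca : c = a
      · subst hca
        have hpa : (pvKeyOf s == some c) = true := by simp [hko]
        have hpb : (pvKeyOf s == some b) = false := by simp [hko, hab]
        rw [List.findIdx_cons, hpa, List.findIdx_cons, hpb]
        simp
      · by_cases hcb : c = b
        · subst hcb
          rw [List.idxOf_cons_self] at hlt
          omega
        · have hbm' : b ∈ pvKeys rest := by
            rcases List.mem_cons.1 hbm with h | h
            · exact absurd h.symm hcb
            · exact h
          rw [List.idxOf_cons_ne _ hca, List.idxOf_cons_ne _ hcb] at hlt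
          have hpa : (pvKeyOf s == some a) = false := by simp [hko, hca]
          have hpb : (pvKeyOf s == some b) = false := by simp [hko, hcb]
          rw [List.findIdx_cons, hpa, List.findIdx_cons, hpb]
          simp only [cond_false]
          have := ih hbm' (by omega)
          omega

-- a line is tagged k by pvKeyOf iff it starts with k's prefix
lemma pv_keyOf_iff {k : String} {p : List Char} (hkp : (k, p) ∈ pvFields) (s : List Char) :
    (pvKeyOf s == some k) = PySem.Chars.startswith s p := by
  cases hs : PySem.Chars.startswith s p with
  | true =>
    have hko : pvKeyOf s = some k := by
      fin_cases hkp
      · exact pv_keyOf_eq_state s hs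
      · exact pv_keyOf_eq_pid s hs
      · exact pv_keyOf_eq_last s hs
    simp [hko]
  | false =>
    cases hko : pvKeyOf s with
    | none => simp
    | some k' =>
      have hsw := (pv_keyOf_some hko).2
      by_cases hk : k' = k
      · subst hk
        rw [pvPrefixOf_mem hkp] at hsw
        rw [hsw] at hs
        cases hs
      · simp [hk]

lemma pv_mem_pvKeys_iff {L : List (List Char)} {k : String} {p : List Char}
    (hkp : (k, p) ∈ pvFields) : k ∈ pvKeys L ↔ pvPresent L p = true := by
  unfold pvKeys pvPresent
  rw [List.any_eq_true]
  constructor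
  · intro h
    rw [List.mem_filterMap] at h
    obtain ⟨o, ho, hid⟩ := h
    rw [List.mem_map] at ho
    obtain ⟨s, hsL, hs⟩ := ho
    refine ⟨s, hsL, ?_⟩
    rw [← pv_keyOf_iff hkp s, hs]
    cases o with
    | none => cases hid
    | some k' => simpa using hid
  · rintro ⟨s, hsL, hs⟩
    rw [List.mem_filterMap]
    refine ⟨some k, ?_, rfl⟩
    rw [List.mem_map]
    refine ⟨s, hsL, ?_⟩
    have h := pv_keyOf_iff hkp s
    rw [hs] at h
    simpa using h

lemma pv_findIdx_eq {k : String} {p : List Char} (hkp : (k, p) ∈ pvFields)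
    (L : List (List Char)) :
    L.findIdx (fun s => pvKeyOf s == some k) =
      L.findIdx (fun s => PySem.Chars.startswith s p) := by
  congr 1
  funext s
  exact pv_keyOf_iff hkp s

-- ranks are distinct on the three keys
lemma pv_rank_inj {x y : String} {px py : List Char} (hx : (x, px) ∈ pvFields)
    (hy : (y, py) ∈ pvFields) (h : pvRank x = pvRank y) : x = y := by
  fin_cases hx <;> fin_cases hy <;> simp [pvRank] at h ⊢

lemma pv_keys_eq (L : List (List Char))
    (hpre : (pvBefore L "state = ".toList "pid = ".toList
      && pvBefore L "state = ".toList "last exit code = ".toList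
      && pvBefore L "pid = ".toList "last exit code = ".toList) = true) :
    PySem.List.dedup (pvKeys L) =
      (pvFields.filter (fun kp => pvPresent L kp.2)).map (fun kp => kp.1) := by
  simp only [Bool.and_eq_true] at hpre
  obtain ⟨⟨hsp, hsl⟩, hpl⟩ := hpre
  have key : ∀ (p q : List Char), pvBefore L p q = true → pvPresent L p = true →
      pvPresent L q = true →
      L.findIdx (fun s => PySem.Chars.startswith s p) <
        L.findIdx (fun s => PySem.Chars.startswith s q) := by
    intro p q hbef hp hq
    unfold pvBefore at hbef
    unfold pvPresent at hp hq
    rw [hp, hq] at hbef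
    simpa using hbef
  have hsub : ((pvFields.filter (fun kp => pvPresent L kp.2)).map (fun kp => kp.1)).Sublist
      (pvFields.map (fun kp => kp.1)) := List.Sublist.map _ List.filter_sublist
  have hnodupL : (PySem.List.dedup (pvKeys L)).Nodup := PySem.List.nodup_dedup _
  have hnodupR : ((pvFields.filter (fun kp => pvPresent L kp.2)).map (fun kp => kp.1)).Nodup :=
    List.Nodup.sublist hsub (by decide)
  have hmem : ∀ x, x ∈ PySem.List.dedup (pvKeys L) ↔
      x ∈ (pvFields.filter (fun kp => pvPresent L kp.2)).map (fun kp => kp.1) := by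
    intro x
    rw [PySem.List.mem_dedup, List.mem_map]
    constructor
    · intro hx
      have hkp := pv_mem_keys hx
      refine ⟨(x, pvPrefixOf x), ?_, rfl⟩
      rw [List.mem_filter]
      exact ⟨hkp, (pv_mem_pvKeys_iff hkp).1 hx⟩
    · rintro ⟨kp, hkp, rfl⟩
      rw [List.mem_filter] at hkp
      exact (pv_mem_pvKeys_iff hkp.1).2 hkp.2
  have hperm : (PySem.List.dedup (pvKeys L)).Perm
      ((pvFields.filter (fun kp => pvPresent L kp.2)).map (fun kp => kp.1)) :=
    (List.perm_ext_iff_of_nodup hnodupL hnodupR).2 hmem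
  have hbefore : ∀ (a b : String) (pa pb : List Char), (a, pa) ∈ pvFields → (b, pb) ∈ pvFields →
      pvRank a < pvRank b → pvPresent L pa = true → pvPresent L pb = true →
      L.findIdx (fun s => PySem.Chars.startswith s pa) <
        L.findIdx (fun s => PySem.Chars.startswith s pb) := by
    intro a b pa pb ha hb hrk hpa hpb
    fin_cases ha <;> fin_cases hb <;> simp [pvRank] at hrk <;>
      [exact key _ _ hsp hpa hpb; exact key _ _ hsl hpa hpb; exact key _ _ hpl hpa hpb]
  have hsortR : ((pvFields.filter (fun kp => pvPresent L kp.2)).map (fun kp => kp.1)).Pairwise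
      (fun a b => pvRank a < pvRank b) :=
    List.Pairwise.sublist hsub (by decide)
  have hsortL : (PySem.List.dedup (pvKeys L)).Pairwise (fun a b => pvRank a < pvRank b) := by
    refine (pv_dedup_pairwise (pvKeys L)).imp_of_mem ?_
    intro a b ha hb hlt
    have ham : a ∈ pvKeys L := (PySem.List.mem_dedup _ _).1 ha
    have hbm : b ∈ pvKeys L := (PySem.List.mem_dedup _ _).1 hb
    have hkpa := pv_mem_keys ham
    have hkpb := pv_mem_keys hbm
    have hab : a ≠ b := by
      intro h
      subst h
      omega
    by_contra hrk
    have hrkba : pvRank b < pvRank a := by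
      have hra : pvRank a ≠ pvRank b := fun h => hab (pv_rank_inj hkpa hkpb h)
      omega
    have h1 : L.findIdx (fun s => pvKeyOf s == some a) <
        L.findIdx (fun s => pvKeyOf s == some b) := pv_fm_order L a b hab hbm hlt
    have h2 := hbefore b a _ _ hkpb hkpa hrkba
      ((pv_mem_pvKeys_iff hkpb).1 hbm) ((pv_mem_pvKeys_iff hkpa).1 ham)
    rw [pv_findIdx_eq hkpa L, pv_findIdx_eq hkpb L] at h1
    omega
  exact @List.Perm.eq_of_pairwise' String (fun a b => pvRank a < pvRank b)
    ⟨fun a b h1 h2 => absurd h2 (by omega)⟩ _ _ hsortL hsortR hperm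

-- values agree on present keys
lemma pv_val_eq {L : List (List Char)} {k : String} {p : List Char}
    (hkp : (k, p) ∈ pvFields) (hp : pvPresent L p = true) :
    pvLastValue L k = pvValB L p := by
  unfold pvLastValue pvValB
  rw [pvPrefixOf_mem hkp, pv_find?_reverse]
  have hne : L.filter (fun s => PySem.Chars.startswith s p) ≠ [] := by
    unfold pvPresent at hp
    rw [List.any_eq_true] at hp
    obtain ⟨s, hsL, hs⟩ := hp
    intro h
    have hmem : s ∈ L.filter (fun s => PySem.Chars.startswith s p) := List.mem_filter.2 ⟨hsL, hs⟩
    rw [h] at hmem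
    cases hmem
  obtain ⟨v, hv⟩ := Option.ne_none_iff_exists'.1 (mt List.getLast?_eq_none_iff.1 hne)
  rw [hv, List.getLast?_map, hv]
  rfl

-- ===== VERDICT (by name: the statement is the Claim_ definition above) =====
theorem parse_launchctl_print_spec : Claim_equal_parse_launchctl_print := by
  intro text _ hpre
  show parse_launchctl_print text = parse_launchctl_print_alt text
  have h1 : parse_launchctl_print text =
      ((pvStrippedLines text).foldl pvStepA PySem.Dict.empty).items := by
    unfold pvStrippedLines
    rw [List.foldl_map]
    rfl
  rw [h1, pv_main, pv_alt_eq_canon]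
  unfold Pre_parse_launchctl_print at hpre
  unfold pvBuildB pvCanon
  rw [pv_keys_eq (pvStrippedLines text) hpre, List.map_map]
  apply List.map_congr_left
  intro kp hkp
  rw [List.mem_filter] at hkp
  exact congrArg (Prod.mk kp.1) (pv_val_eq hkp.1 hkp.2)
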